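-- pv_equiv track=rewrite | github.com/danielpmadden/ArcPrize2025 | REAP.py | infer_color_map
-- ===== SOURCE A (Python) =====
-- from typing import List, Tuple, Dict, Any, Optional
--
-- Grid = List[List[int]]
--
-- Color = int
--
-- def dims(g: Grid) -> Tuple[int, int]:
--     return (0, 0) if not g or not g[0] else (len(g), len(g[0]))
--
-- def infer_color_map(grid_in: Grid, grid_out: Grid) -> Optional[Dict[Color, Color]]:
--     if dims(grid_in) != dims(grid_out):
--         return None
--     mapping, mapped_values = {}, set()
--     H, W = dims(grid_in)
--     for r in range(H):
--         for c in range(W):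
--             ci, co = grid_in[r][c], grid_out[r][c]
--             if ci == co:
--                 continue
--             if ci in mapping and mapping[ci] != co:
--                 return None
--             mapping[ci] = co
--             mapped_values.add(co)
--     if len(mapped_values) < len(mapping):
--         return None
--     return mapping
-- ===== SOURCE B (Python) =====
-- from typing import List, Tuple, Dict, Optional
--
-- Grid = List[List[int]]
-- Color = int
--
-- def dims(g: Grid) -> Tuple[int, int]:
--     return (0, 0) if not g or not g[0] else (len(g), len(g[0]))
--
-- def infer_color_map(grid_in: Grid, grid_out: Grid) -> Optional[Dict[Color, Color]]:
--     if dims(grid_in) != dims(grid_out):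
--         return None
--     flat_in = [c for row in grid_in for c in row]
--     flat_out = [c for row in grid_out for c in row]
--     pairs = list(zip(flat_in, flat_out))
--     # source colors, in order of their first changing occurrence
--     sources = []
--     for ci, co in pairs:
--         if ci != co and ci not in sources:
--             sources.append(ci)
--     # group by source: each changing source must have exactly one target
--     mapping = {}
--     for s in sources:
--         ts = {co for ci, co in pairs if ci == s and co != s}
--         if len(ts) != 1:
--             return None
--         (t,) = ts
--         mapping[s] = t
--     # injectivity of the map
--     if len(set(mapping.values())) < len(mapping):
--         return None
--     return mapping
-- ===== Notes on version B (the rewrite author's own statement) =====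
-- stated objective: alternative
-- what changed: B replaces A's single streaming pass (dict + value-set maintained cell by cell with early conflict exit) by a staged group-by-source algorithm: flatten both grids, list the source colors in first-changing-occurrence order, then for each source collect its set of targets over the whole flattened stream and demand it be a singleton, validating injectivity at the end.
-- outside the precondition, e.g. on infer_color_map([[1], [2, 3]], [[4], [5, 6]]): A returns {1: 4, 2: 5}, B returns {1: 4, 2: 5, 3: 6}; on infer_color_map([[], [1]], [[], [2]]): A returns {}, B returns {1: 2}
import Mathlib
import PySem

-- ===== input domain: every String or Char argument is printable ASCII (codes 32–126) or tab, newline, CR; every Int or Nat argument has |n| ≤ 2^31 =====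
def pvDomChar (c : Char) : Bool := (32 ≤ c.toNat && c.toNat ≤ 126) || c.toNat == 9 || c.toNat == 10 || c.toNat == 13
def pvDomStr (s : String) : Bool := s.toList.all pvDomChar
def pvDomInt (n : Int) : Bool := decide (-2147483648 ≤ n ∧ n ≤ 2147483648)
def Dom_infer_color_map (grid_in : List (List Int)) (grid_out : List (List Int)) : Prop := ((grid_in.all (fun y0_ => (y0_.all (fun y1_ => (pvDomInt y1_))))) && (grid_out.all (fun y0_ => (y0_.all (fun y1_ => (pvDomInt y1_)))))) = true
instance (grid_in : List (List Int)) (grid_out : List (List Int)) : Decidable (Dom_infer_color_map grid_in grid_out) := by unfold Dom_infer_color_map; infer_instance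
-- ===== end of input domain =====

-- B replaces A's single streaming pass (dict + value-set with early conflict exit) by a staged
-- group-by-source algorithm: flatten both grids, list source colors in first-changing-occurrence
-- order, then for each source collect its target set over the whole stream and demand a singleton.

-- ===== PORT A =====
-- helper `dims` of A: (0,0) if grid empty or first row empty, else (len(g), len(g[0]))
def pyDims (g : List (List Int)) : Int × Int :=
  if g = [] ∨ g.headD [] = [] then (0, 0) else ((g.length : Int), ((g.headD []).length : Int))

-- the body of A's inner loop: one cell (ci, co); `None` (early return) is absorbing
def icmStep (st : Option (PySem.Dict Int Int × PySem.Set Int)) (ci co : Int) :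
    Option (PySem.Dict Int Int × PySem.Set Int) :=
  match st with
  | none => none
  | some (m, mv) =>
    if ci = co then some (m, mv)
    else
      match m.get? ci with  -- `ci in mapping and mapping[ci] != co` (short-circuit and)
      | some v => if v ≠ co then none else some (m.insert ci co, PySem.Set.add mv co)
      | none => some (m.insert ci co, PySem.Set.add mv co)

def infer_color_map (grid_in : List (List Int)) (grid_out : List (List Int)) : Option (List (Int × Int)) :=
  if pyDims grid_in ≠ pyDims grid_out then none
  else
    let H := (pyDims grid_in).1
    let W := (pyDims grid_in).2
    let res := (PySem.List.pyRange 0 H 1).foldl (fun st r =>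
        (PySem.List.pyRange 0 W 1).foldl (fun st2 c =>
          icmStep st2 (PySem.List.pyGetD (PySem.List.pyGetD grid_in r []) c 0)
                      (PySem.List.pyGetD (PySem.List.pyGetD grid_out r []) c 0)) st)
        (some (PySem.Dict.empty, PySem.Set.empty))
    match res with
    | none => none
    | some (m, mv) => if mv.length < m.items.length then none else some m.items

-- ===== PORT B =====
-- `if ci != co and ci not in sources: sources.append(ci)`
def srcStep (acc : List Int) (p : Int × Int) : List Int :=
  if p.1 ≠ p.2 ∧ p.1 ∉ acc then acc ++ [p.1] else acc

-- `{co for ci, co in pairs if ci == s and co != s}`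
def targetsOf (pairs : List (Int × Int)) (s : Int) : PySem.Set Int :=
  PySem.Set.ofList ((pairs.filter (fun p => p.1 == s && p.2 != s)).map Prod.snd)

-- body of B's per-source loop: conflict (len(ts) != 1) early-returns None; `(t,) = ts` is headD
def bStep (pairs : List (Int × Int)) (st : Option (PySem.Dict Int Int)) (s : Int) :
    Option (PySem.Dict Int Int) :=
  match st with
  | none => none
  | some m =>
    let ts := targetsOf pairs s
    if ts.length ≠ 1 then none else some (m.insert s (ts.headD 0))

def infer_color_map_alt (grid_in : List (List Int)) (grid_out : List (List Int)) : Option (List (Int × Int)) :=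
  if pyDims grid_in ≠ pyDims grid_out then none
  else
    let pairs := (grid_in.flatMap id).zip (grid_out.flatMap id)
    let sources := pairs.foldl srcStep []
    match sources.foldl (bStep pairs) (some PySem.Dict.empty) with
    | none => none
    | some m =>
      if (PySem.Set.ofList m.values).length < m.items.length then none else some m.items

-- ===== PRECONDITION & SPEC =====
-- Pre_ excludes ragged grids whose dims happen to match: there A raises IndexError on rows
-- shorter than the first row, or silently ignores cells beyond the first row's width / beyond
-- an empty first row, while B's flattening reads every cell.
def Pre_infer_color_map (grid_in : List (List Int)) (grid_out : List (List Int)) : Prop :=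
  pyDims grid_in = pyDims grid_out →
    ((∀ row ∈ grid_in, row.length = (grid_in.headD []).length) ∧
     (∀ row ∈ grid_out, row.length = (grid_out.headD []).length))
instance (grid_in : List (List Int)) (grid_out : List (List Int)) : Decidable (Pre_infer_color_map grid_in grid_out) := by unfold Pre_infer_color_map; infer_instance

def pvWitness_infer_color_map : List (List Int) × List (List Int) :=
  ([[1, 2], [3, 4]], [[5, 2], [3, 1]])

def Spec_infer_color_map (grid_in : List (List Int)) (grid_out : List (List Int)) (out : Option (List (Int × Int))) : Prop := out = infer_color_map_alt grid_in grid_out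
instance (grid_in : List (List Int)) (grid_out : List (List Int)) (out : Option (List (Int × Int))) : Decidable (Spec_infer_color_map grid_in grid_out out) := by unfold Spec_infer_color_map; infer_instance

-- ===== CLAIM (what is proved, stated in full; the proofs are below) =====
def Claim_equal_infer_color_map : Prop := ∀ (grid_in : List (List Int)) (grid_out : List (List Int)), Dom_infer_color_map grid_in grid_out → Pre_infer_color_map grid_in grid_out → Spec_infer_color_map grid_in grid_out (infer_color_map grid_in grid_out)

-- ===== LEMMAS AND PROOFS =====

-- A's loop body applied to a cell pair
def stepP (st : Option (PySem.Dict Int Int × PySem.Set Int)) (p : Int × Int) :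
    Option (PySem.Dict Int Int × PySem.Set Int) := icmStep st p.1 p.2

-- the distinct changing transitions of a cell list, in first-occurrence order
def transOf (l : List (Int × Int)) : List (Int × Int) :=
  PySem.Set.ofList (l.filter (fun p => p.1 != p.2))

-- the row-major cell pairs of two grids, zipped row by row
def cellsOf (g1 g2 : List (List Int)) : List (Int × Int) :=
  (g1.zip g2).flatMap (fun rr => rr.1.zip rr.2)

theorem dict_eta (d : PySem.Dict Int Int) : PySem.Dict.mk d.items = d := rfl

theorem foldl_stepP_none (l : List (Int × Int)) : l.foldl stepP none = none := by
  induction l with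
  | nil => rfl
  | cons x xs ih => simpa [stepP, icmStep] using ih

-- the key invariant of A's scan: after processing l, the state is `none` iff some source
-- color occurs with two targets among l's changing transitions; otherwise the dict holds
-- exactly the distinct transitions and the value-set exactly their targets
theorem foldl_stepP_inv (l : List (Int × Int)) :
    l.foldl stepP (some (PySem.Dict.empty, PySem.Set.empty)) =
      if ((transOf l).map Prod.fst).Nodup
      then some (PySem.Dict.mk (transOf l), PySem.Set.ofList ((transOf l).map Prod.snd))
      else none := by
  induction l using List.reverseRecOn with
  | nil => simp [transOf, PySem.Set.ofList, PySem.Dict.empty, PySem.Set.empty]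
  | append_singleton xs x ih =>
    have htrans : transOf (xs ++ [x]) =
        if x.1 = x.2 then transOf xs else PySem.Set.add (transOf xs) x := by
      simp only [transOf, List.filter_append]
      by_cases hx : x.1 = x.2
      · simp [hx]
      · simp [hx, PySem.Set.ofList_append_singleton]
    rw [List.foldl_append, ih]
    by_cases hnd : ((transOf xs).map Prod.fst).Nodup
    · rw [if_pos hnd]
      by_cases hx : x.1 = x.2
      · rw [htrans, if_pos hx]
        simp only [List.foldl_cons, List.foldl_nil, stepP, icmStep, if_pos hx, if_pos hnd]
      · rw [htrans, if_neg hx]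
        set T := transOf xs with hT
        have hkeys : (PySem.Dict.mk T).keys = T.map Prod.fst := by
          simp [PySem.Dict.keys_mk]
        simp only [List.foldl_cons, List.foldl_nil, stepP, icmStep, if_neg hx]
        cases hget : (PySem.Dict.mk T).get? x.1 with
        | none =>
          dsimp only
          have hx1 : x.1 ∉ T.map Prod.fst := by
            have := (PySem.Dict.get?_eq_none_iff_not_mem_keys (PySem.Dict.mk T) x.1).mp hget
            rwa [hkeys] at this
          have hxT : x ∉ T := fun hmem => hx1 (List.mem_map_of_mem (f := Prod.fst) hmem)
          have hadd : PySem.Set.add T x = T ++ [x] := PySem.Set.add_of_not_mem hxT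
          rw [hadd]
          have hnd' : ((T ++ [x]).map Prod.fst).Nodup := by
            rw [List.map_append]
            exact List.nodup_append.mpr ⟨hnd, by simp,
              fun a ha b hb => by simp at hb; subst hb; exact fun hab => hx1 (hab ▸ ha)⟩
          rw [if_pos hnd']
          have hitems : ((PySem.Dict.mk T).insert x.1 x.2).items = T ++ [x] := by
            rw [PySem.Dict.items_insert_of_not_contains _ _
              (by simp [PySem.Dict.contains_eq_isSome_get?, hget])]
          have hdict : (PySem.Dict.mk T).insert x.1 x.2 = PySem.Dict.mk (T ++ [x]) := by
            rw [← dict_eta ((PySem.Dict.mk T).insert x.1 x.2), hitems]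
          rw [hdict, List.map_append, List.map_singleton,
            PySem.Set.ofList_append_singleton]
        | some v =>
          have hmemv : (x.1, v) ∈ T := PySem.Dict.mem_items_of_get?_eq_some _ hget
          dsimp only
          by_cases hv : v = x.2
          · rw [hv] at hmemv hget
            have hx' : x = (x.1, x.2) := rfl
            have hxT : x ∈ T := hx' ▸ hmemv
            rw [if_neg (by simp [hv] : ¬ v ≠ x.2), PySem.Set.add_of_mem hxT, if_pos hnd]
            have hins : (PySem.Dict.mk T).insert x.1 x.2 = PySem.Dict.mk T := by
              rw [← dict_eta ((PySem.Dict.mk T).insert x.1 x.2)]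
              have : ((PySem.Dict.mk T).insert x.1 x.2).items = T := by
                rw [PySem.Dict.items_insert_of_contains _ _
                  (by simp [PySem.Dict.contains_eq_isSome_get?, hget])]
                conv_rhs => rw [← List.map_id T]
                apply List.map_congr_left
                intro p hp
                by_cases hp1 : p.1 = x.1
                · have : p = (x.1, x.2) :=
                    List.inj_on_of_nodup_map hnd hp hmemv (by simpa using hp1)
                  simp [this]
                · simp [hp1]
              rw [this]
            rw [hins, PySem.Set.add_of_mem
              ((PySem.Set.mem_ofList _ _).mpr (List.mem_map_of_mem (f := Prod.snd) hxT))]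
          · rw [if_pos hv]
            have hxT : x ∉ T := by
              intro hmem
              have hx2 : x = (x.1, x.2) := rfl
              have := PySem.Dict.get?_of_mem_items (PySem.Dict.mk T)
                (hx2 ▸ hmem) (by rw [hkeys]; exact hnd)
              rw [hget] at this
              exact hv (by injection this)
            rw [PySem.Set.add_of_not_mem hxT]
            have hx1T : x.1 ∈ T.map Prod.fst := List.mem_map.mpr ⟨(x.1, v), hmemv, rfl⟩
            rw [if_neg (by
              rw [List.map_append]
              intro hnd'
              exact (List.nodup_append.mp hnd').2.2 x.1 hx1T x.1 (by simp) rfl)]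
    · rw [if_neg hnd, foldl_stepP_none]
      rw [if_neg (by
        rw [htrans]
        by_cases hx : x.1 = x.2
        · rwa [if_pos hx]
        · rw [if_neg hx, PySem.Set.add_eq_ite]
          split
          · exact hnd
          · rw [List.map_append]
            exact fun h => hnd (List.Nodup.of_append_left h))]

theorem inner_eq (ri ro : List Int) (h : ro.length = ri.length)
    (st : Option (PySem.Dict Int Int × PySem.Set Int)) :
    (PySem.List.pyRange 0 (ri.length : Int) 1).foldl
      (fun st2 c => icmStep st2 (PySem.List.pyGetD ri c 0) (PySem.List.pyGetD ro c 0)) st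
    = (ri.zip ro).foldl stepP st := by
  have hz : (ri.zip ro).length = ri.length := by simp [List.length_zip, h]
  rw [show (ri.length : Int) = ((ri.zip ro).length : Int) by rw [hz]]
  rw [← PySem.List.foldl_pyRange_zero_pyGetD' (ri.zip ro) (0, 0) stepP st]
  apply PySem.List.foldl_congr_mem
  intro acc c hc
  obtain ⟨hc0, hc1⟩ := PySem.List.mem_pyRange_one.mp hc
  rw [hz] at hc1
  rw [PySem.List.pyGetD_eq_getElem ri 0 hc0 hc1,
      PySem.List.pyGetD_eq_getElem ro 0 hc0 (by rw [h]; exact hc1),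
      PySem.List.pyGetD_eq_getElem (ri.zip ro) (0, 0) hc0 (by rw [hz]; exact hc1),
      List.getElem_zip]
  rfl

theorem outer_eq (g1 g2 : List (List Int)) (W : Nat)
    (hlen : g2.length = g1.length)
    (h1 : ∀ row ∈ g1, row.length = W) (h2 : ∀ row ∈ g2, row.length = W)
    (init : Option (PySem.Dict Int Int × PySem.Set Int)) :
    (PySem.List.pyRange 0 (g1.length : Int) 1).foldl (fun st r =>
      (PySem.List.pyRange 0 (W : Int) 1).foldl (fun st2 c =>
        icmStep st2 (PySem.List.pyGetD (PySem.List.pyGetD g1 r []) c 0)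
                    (PySem.List.pyGetD (PySem.List.pyGetD g2 r []) c 0)) st) init
    = (cellsOf g1 g2).foldl stepP init := by
  rw [cellsOf, List.foldl_flatMap]
  have hz : (g1.zip g2).length = g1.length := by simp [List.length_zip, hlen]
  rw [show (g1.length : Int) = ((g1.zip g2).length : Int) by rw [hz]]
  rw [← PySem.List.foldl_pyRange_zero_pyGetD' (g1.zip g2) ([], [])
    (fun acc rr => (rr.1.zip rr.2).foldl stepP acc) init]
  apply PySem.List.foldl_congr_mem
  intro acc r hr
  obtain ⟨hr0, hr1⟩ := PySem.List.mem_pyRange_one.mp hr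
  rw [hz] at hr1
  rw [PySem.List.pyGetD_eq_getElem g1 [] hr0 hr1,
      PySem.List.pyGetD_eq_getElem g2 [] hr0 (by rw [hlen]; exact hr1),
      PySem.List.pyGetD_eq_getElem (g1.zip g2) ([], []) hr0 (by rw [hz]; exact hr1),
      List.getElem_zip]
  have hw1 : g1[r.toNat].length = W := h1 _ (List.getElem_mem _)
  have hw2 : g2[r.toNat].length = W := h2 _ (List.getElem_mem _)
  rw [show (W : Int) = (g1[r.toNat].length : Int) by rw [hw1]]
  exact inner_eq _ _ (by rw [hw1, hw2]) acc

theorem items_foldl_insert (ps : List (Int × Int)) (h : (ps.map Prod.fst).Nodup) :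
    (ps.foldl (fun d p => d.insert p.1 p.2) PySem.Dict.empty).items = ps := by
  induction ps using List.reverseRecOn with
  | nil => rfl
  | append_singleton xs x ih =>
    rw [List.map_append] at h
    have hnd := List.Nodup.of_append_left h
    have hx1 : x.1 ∉ xs.map Prod.fst := fun hmem =>
      (List.nodup_append.mp h).2.2 x.1 hmem x.1 (by simp) rfl
    rw [List.foldl_append, List.foldl_cons, List.foldl_nil]
    have hprev : (xs.foldl (fun d p => d.insert p.1 p.2) PySem.Dict.empty) =
        PySem.Dict.mk xs := by
      rw [← dict_eta (xs.foldl (fun d p => d.insert p.1 p.2) PySem.Dict.empty), ih hnd]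
    rw [hprev, PySem.Dict.items_insert_of_not_contains _ _ (by
      rw [PySem.Dict.contains_eq_isSome_get?,
        (PySem.Dict.get?_eq_none_iff_not_mem_keys _ _).mpr (by
          rw [show (PySem.Dict.mk xs).keys = xs.map Prod.fst from by simp [PySem.Dict.keys_mk]]
          exact hx1)]
      rfl)]

-- flattening two same-shape grids and zipping equals the row-by-row zip
theorem zip_flatten_eq_cells (g1 g2 : List (List Int))
    (hlen : g2.length = g1.length)
    (hrow : ∀ rr ∈ g1.zip g2, rr.1.length = rr.2.length) :
    (g1.flatMap id).zip (g2.flatMap id) = cellsOf g1 g2 := by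
  induction g1 generalizing g2 with
  | nil =>
    have : g2 = [] := by simpa using hlen
    subst this; rfl
  | cons a t1 ih =>
    cases g2 with
    | nil => simp at hlen
    | cons b t2 =>
      have hab : a.length = b.length := hrow (a, b) (by simp [List.zip_cons_cons])
      simp only [List.flatMap_cons, id, cellsOf, List.zip_cons_cons, List.flatMap_cons]
      rw [List.zip_append (by rw [hab])]
      rw [ih t2 (by simpa using hlen)
        (fun rr hrr => hrow rr (by simp [List.zip_cons_cons]; right; exact hrr))]
      rfl

-- B's source collection is the ordered set of changing source colors
theorem sources_eq (pairs : List (Int × Int)) : ∀ acc,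
    pairs.foldl srcStep acc =
      PySem.Set.update acc ((pairs.filter (fun p => p.1 != p.2)).map Prod.fst) := by
  induction pairs with
  | nil => intro acc; simp [PySem.Set.update_nil]
  | cons p ps ih =>
    intro acc
    by_cases hp : p.1 = p.2
    · have : srcStep acc p = acc := by simp [srcStep, hp]
      simp only [List.foldl_cons, this, List.filter_cons, hp]
      simpa [hp] using ih acc
    · have hstep : srcStep acc p = PySem.Set.add acc p.1 := by
        rw [PySem.Set.add_eq_ite]
        by_cases hm : p.1 ∈ acc
        · simp [srcStep, hp, hm]
        · simp [srcStep, hp, hm]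
      simp only [List.foldl_cons, hstep, List.filter_cons]
      rw [if_pos (by simpa [bne] using hp)]
      rw [List.map_cons, PySem.Set.update_cons]
      exact ih (PySem.Set.add acc p.1)

-- dedup commutes with taking first components when the deduped firsts are distinct
theorem ofList_map_fst (C : List (Int × Int))
    (hnd : ((PySem.Set.ofList C).map Prod.fst).Nodup) :
    PySem.Set.ofList (C.map Prod.fst) = (PySem.Set.ofList C).map Prod.fst := by
  induction C using List.reverseRecOn with
  | nil => rfl
  | append_singleton xs x ih =>
    rw [PySem.Set.ofList_append_singleton] at hnd ⊢
    rw [List.map_append, List.map_singleton, PySem.Set.ofList_append_singleton]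
    by_cases hx : x ∈ PySem.Set.ofList xs
    · rw [PySem.Set.add_of_mem hx] at hnd ⊢
      rw [ih hnd]
      exact PySem.Set.add_of_mem (List.mem_map_of_mem (f := Prod.fst) hx)
    · rw [PySem.Set.add_of_not_mem hx] at hnd ⊢
      rw [List.map_append] at hnd
      have hpre := List.Nodup.of_append_left hnd
      have hx1 : x.1 ∉ (PySem.Set.ofList xs).map Prod.fst := fun hmem =>
        (List.nodup_append.mp hnd).2.2 x.1 hmem x.1 (by simp) rfl
      rw [ih hpre, PySem.Set.add_of_not_mem hx1, List.map_append, List.map_singleton]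

-- the targets of s are the second components of the changing pairs whose source is s
theorem targetsOf_eq (pairs : List (Int × Int)) (s : Int) :
    targetsOf pairs s = PySem.Set.ofList
      (((pairs.filter (fun p => p.1 != p.2)).filter (fun p => p.1 == s)).map Prod.snd) := by
  rw [targetsOf, List.filter_filter]
  have hf : pairs.filter (fun p => p.1 == s && p.2 != s)
      = pairs.filter (fun a => a.1 == s && a.1 != a.2) := by
    apply List.filter_congr
    intro p _
    by_cases h1 : p.1 = s
    · subst h1
      simp only [bne]
      rw [BEq.comm (a := p.2) (b := p.1)]
    · rw [show (p.1 == s) = false from by simpa using h1]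
      simp
  rw [hf]

-- a nonempty list of copies of t dedups to [t]
theorem ofList_const (l : List Int) (t : Int) (hne : l ≠ []) (hall : ∀ x ∈ l, x = t) :
    PySem.Set.ofList l = [t] := by
  induction l using List.reverseRecOn with
  | nil => exact absurd rfl hne
  | append_singleton xs x ih =>
    have hx : x = t := hall x (by simp)
    subst hx
    rw [PySem.Set.ofList_append_singleton]
    cases hxs : xs with
    | nil => subst hxs; rfl
    | cons y ys =>
      rw [← hxs, ih (by simp [hxs]) (fun z hz => hall z (by simp [hz]))]
      exact PySem.Set.add_of_mem (by simp)

-- under a functional transition set, each source's target set is the singleton of its target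
theorem targetsOf_singleton (pairs : List (Int × Int)) (p : Int × Int)
    (hnd : ((transOf pairs).map Prod.fst).Nodup) (hp : p ∈ transOf pairs) :
    targetsOf pairs p.1 = [p.2] := by
  have hpC : p ∈ pairs.filter (fun q => q.1 != q.2) := by
    unfold transOf at hp
    exact (PySem.Set.mem_ofList _ _).mp hp
  rw [targetsOf_eq]
  apply ofList_const
  · intro hnil
    have hmem : p.2 ∈ ((pairs.filter (fun q => q.1 != q.2)).filter
        (fun q => q.1 == p.1)).map Prod.snd :=
      List.mem_map.mpr ⟨p, List.mem_filter.mpr ⟨hpC, by simp⟩, rfl⟩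
    rw [hnil] at hmem
    exact List.not_mem_nil hmem
  · intro x hx
    obtain ⟨q, hq, hqx⟩ := List.mem_map.mp hx
    obtain ⟨hqC, hq1⟩ := List.mem_filter.mp hq
    have hqT : q ∈ transOf pairs := by
      unfold transOf
      exact (PySem.Set.mem_ofList _ _).mpr hqC
    have hqp : q = p := List.inj_on_of_nodup_map hnd hqT hp (by simpa using hq1)
    rw [← hqx, hqp]

-- B's per-source build loop over distinct functional sources is a plain insert fold
theorem build_fold (pairs : List (Int × Int)) :
    ∀ (L : List (Int × Int)) (m : PySem.Dict Int Int),
      (∀ p ∈ L, targetsOf pairs p.1 = [p.2]) →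
      (L.map Prod.fst).foldl (bStep pairs) (some m) =
        some (L.foldl (fun d p => d.insert p.1 p.2) m) := by
  intro L
  induction L with
  | nil => intro m _; rfl
  | cons p ps ih =>
    intro m hall
    have hts : targetsOf pairs p.1 = [p.2] := hall p (by simp)
    simp only [List.map_cons, List.foldl_cons]
    have : bStep pairs (some m) p.1 = some (m.insert p.1 p.2) := by
      simp [bStep, hts]
    rw [this]
    exact ih (m.insert p.1 p.2) (fun q hq => hall q (by simp [hq]))

theorem foldl_bStep_none (pairs : List (Int × Int)) (L : List Int) :
    L.foldl (bStep pairs) none = none := by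
  induction L with
  | nil => rfl
  | cons x xs ih => simpa [bStep] using ih

-- a source whose target set is not a singleton kills B's build fold
theorem foldl_bStep_conflict (pairs : List (Int × Int)) (s : Int)
    (hbad : (targetsOf pairs s).length ≠ 1) :
    ∀ (L : List Int) (st : Option (PySem.Dict Int Int)), s ∈ L →
      L.foldl (bStep pairs) st = none := by
  intro L
  induction L with
  | nil => intro st h; simp at h
  | cons x xs ih =>
    intro st hmem
    rcases List.mem_cons.mp hmem with hx | hx
    · subst hx
      have : bStep pairs st s = none := by
        cases st with
        | none => rfl
        | some m => simp [bStep, hbad]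
      rw [List.foldl_cons, this, foldl_bStep_none]
    · rw [List.foldl_cons]
      exact ih _ hx

-- two distinct members force length ≥ 2
theorem two_le_length_of_two_mem {α : Type} (L : List α) (a b : α)
    (ha : a ∈ L) (hb : b ∈ L) (hab : a ≠ b) : 2 ≤ L.length := by
  cases L with
  | nil => simp at ha
  | cons x xs =>
    cases xs with
    | nil =>
      simp at ha hb
      exact absurd (ha.trans hb.symm) hab
    | cons y ys => simp

-- a nodup pair list with duplicated first components has one source with two targets
theorem dup_fst_two_targets (T : List (Int × Int)) (hT : T.Nodup)
    (hnd : ¬ (T.map Prod.fst).Nodup) :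
    ∃ s a b, (s, a) ∈ T ∧ (s, b) ∈ T ∧ a ≠ b := by
  induction T with
  | nil => simp at hnd
  | cons x xs ih =>
    rw [List.map_cons, List.nodup_cons] at hnd
    by_cases hxs : (xs.map Prod.fst).Nodup
    · have hx1 : x.1 ∈ xs.map Prod.fst := by
        by_contra hc
        exact hnd ⟨hc, hxs⟩
      obtain ⟨q, hq, hq1⟩ := List.mem_map.mp hx1
      have hq' : (x.1, q.2) = q := by rw [← hq1]
      refine ⟨x.1, x.2, q.2, by simp, List.mem_cons.mpr (Or.inr (hq' ▸ hq)), ?_⟩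
      intro h
      have hxq : x = q := Prod.ext_iff.mpr ⟨hq1.symm, h⟩
      exact (List.nodup_cons.mp hT).1 (hxq ▸ hq)
    · obtain ⟨s, a, b, ha, hb, hab⟩ := ih (List.nodup_cons.mp hT).2 hxs
      exact ⟨s, a, b, List.mem_cons.mpr (Or.inr ha), List.mem_cons.mpr (Or.inr hb), hab⟩

-- B's whole post-guard computation, expressed over any pair list
theorem bCore_eq (pairs : List (Int × Int)) :
    (match (pairs.foldl srcStep []).foldl (bStep pairs) (some PySem.Dict.empty) with
     | none => none
     | some m =>
       if (PySem.Set.ofList m.values).length < m.items.length then none else some m.items)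
    = (match pairs.foldl stepP (some (PySem.Dict.empty, PySem.Set.empty)) with
       | none => none
       | some (m, mv) => if mv.length < m.items.length then none else some m.items) := by
  rw [foldl_stepP_inv]
  set C := pairs.filter (fun p => p.1 != p.2) with hC
  have hTC : transOf pairs = PySem.Set.ofList C := rfl
  have hsrc : pairs.foldl srcStep [] = PySem.Set.ofList (C.map Prod.fst) := by
    rw [sources_eq pairs [], PySem.Set.update_nil_left, hC]
  by_cases hnd : ((transOf pairs).map Prod.fst).Nodup
  · rw [if_pos hnd]
    have hsrc2 : pairs.foldl srcStep [] = (transOf pairs).map Prod.fst := by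
      rw [hsrc, ofList_map_fst C (by rw [← hTC]; exact hnd), ← hTC]
    rw [hsrc2, build_fold pairs (transOf pairs) PySem.Dict.empty
      (fun p hp => targetsOf_singleton pairs p hnd hp)]
    have hitems : ((transOf pairs).foldl (fun d p => d.insert p.1 p.2) PySem.Dict.empty).items
        = transOf pairs := items_foldl_insert _ hnd
    have hvals : ((transOf pairs).foldl (fun d p => d.insert p.1 p.2) PySem.Dict.empty).values
        = (transOf pairs).map Prod.snd := by
      simp only [PySem.Dict.values, hitems]
    simp only [hitems, hvals]
  · rw [if_neg hnd]
    obtain ⟨s, a, b, ha, hb, hab⟩ :=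
      dup_fst_two_targets (transOf pairs) (hTC ▸ PySem.Set.nodup_ofList C) hnd
    have hmem : ∀ t, (s, t) ∈ transOf pairs → t ∈ targetsOf pairs s := by
      intro t ht
      rw [targetsOf_eq, ← hC]
      apply (PySem.Set.mem_ofList _ _).mpr
      apply List.mem_map.mpr
      exact ⟨(s, t), List.mem_filter.mpr ⟨(PySem.Set.mem_ofList _ _).mp (hTC ▸ ht), by simp⟩, rfl⟩
    have hbad : (targetsOf pairs s).length ≠ 1 := by
      have h2 := two_le_length_of_two_mem _ a b (hmem a ha) (hmem b hb) hab
      omega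
    have hsmem : s ∈ pairs.foldl srcStep [] := by
      rw [hsrc]
      apply (PySem.Set.mem_ofList _ _).mpr
      exact List.mem_map.mpr ⟨(s, a), (PySem.Set.mem_ofList _ _).mp (hTC ▸ ha), rfl⟩
    rw [foldl_bStep_conflict pairs s hbad _ _ hsmem]

theorem flatMap_rows_nil (g : List (List Int))
    (h0 : g = [] ∨ g.headD [] = [])
    (hr : ∀ row ∈ g, row.length = (g.headD []).length) :
    g.flatMap id = [] := by
  rcases h0 with h0 | h0
  · subst h0; rfl
  · apply List.flatMap_eq_nil_iff.mpr
    intro row hrow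
    have : row.length = 0 := by rw [hr row hrow, h0]; rfl
    exact List.eq_nil_of_length_eq_zero this

-- ===== VERDICT (by name: the statement is the Claim_ definition above) =====
theorem infer_color_map_spec : Claim_equal_infer_color_map := by
  intro g1 g2 _ hpre
  unfold Spec_infer_color_map infer_color_map infer_color_map_alt
  by_cases hd : pyDims g1 = pyDims g2
  · rw [if_neg (not_not_intro hd), if_neg (not_not_intro hd)]
    obtain ⟨hr1, hr2⟩ := hpre hd
    by_cases h0 : g1 = [] ∨ g1.headD [] = []
    · -- degenerate dims (0, 0): both sides process no cells
      have hd1 : pyDims g1 = (0, 0) := by unfold pyDims; rw [if_pos h0]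
      have hflat : g1.flatMap id = [] := flatMap_rows_nil g1 h0 hr1
      have hzip : (g1.flatMap id).zip (g2.flatMap id) = ([] : List (Int × Int)) := by
        rw [hflat]; rfl
      simp only [hd1, hzip]
      rfl
    · have hne : g1 ≠ [] := fun h => h0 (Or.inl h)
      have hd1 : pyDims g1 = ((g1.length : Int), ((g1.headD []).length : Int)) := by
        unfold pyDims; rw [if_neg h0]
      have h0' : ¬ (g2 = [] ∨ g2.headD [] = []) := by
        intro h
        have h2 : pyDims g2 = (0, 0) := by unfold pyDims; rw [if_pos h]
        rw [← hd, hd1] at h2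
        have := congrArg Prod.fst h2
        simp at this
        exact hne this
      have hd2 : pyDims g2 = ((g2.length : Int), ((g2.headD []).length : Int)) := by
        unfold pyDims; rw [if_neg h0']
      have hdp : ((g1.length : Int), ((g1.headD []).length : Int)) =
          ((g2.length : Int), ((g2.headD []).length : Int)) := by
        rw [← hd1, ← hd2, hd]
      have hlen : g2.length = g1.length := by
        have h1 : (g1.length : Int) = (g2.length : Int) := (Prod.ext_iff.mp hdp).1
        exact_mod_cast h1.symm
      have hW : (g2.headD []).length = (g1.headD []).length := by
        have h2 : ((g1.headD []).length : Int) = ((g2.headD []).length : Int) :=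
          (Prod.ext_iff.mp hdp).2
        exact_mod_cast h2.symm
      have hrows2 : ∀ row ∈ g2, row.length = (g1.headD []).length :=
        fun row hrow => by rw [hr2 row hrow, hW]
      have hzip : (g1.flatMap id).zip (g2.flatMap id) = cellsOf g1 g2 := by
        apply zip_flatten_eq_cells g1 g2 hlen
        intro rr hrr
        have hmem := List.of_mem_zip hrr
        rw [hr1 rr.1 hmem.1, hrows2 rr.2 hmem.2]
      simp only [hd1, hzip]
      rw [outer_eq g1 g2 (g1.headD []).length hlen hr1 hrows2]
      exact (bCore_eq (cellsOf g1 g2)).symm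
  · rw [if_pos hd, if_pos hd]
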